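-- pv_equiv track=rewrite | github.com/brodiemilliken/LLMPress | AI/token_utils.py | split_tokens_by_breaks
-- ===== SOURCE A (Python) =====
-- from typing import Tuple, List, Any
--
-- TOKEN_TYPE_BREAK = "<BREAK>"
--
-- def split_tokens_by_breaks(tokens: List[Tuple[str, int]]) -> List[List[Tuple[str, int]]]:
--     """
--     Splits a list of tokens at <BREAK> markers.
--
--     Args:
--         tokens (List[Tuple[str, int]]): The list of tokens to split.
--
--     Returns:
--         List[List[Tuple[str, int]]]: A list of token chunks.
--     """
--     chunks = []
--     current_chunk = []
--
--     for token in tokens: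
--         if token[0] == TOKEN_TYPE_BREAK:
--             if current_chunk:  # Only add non-empty chunks
--                 chunks.append(current_chunk)
--                 current_chunk = []
--         else:
--             current_chunk.append(token)
--
--     # Add the last chunk if it's not empty
--     if current_chunk:
--         chunks.append(current_chunk)
--
--     return chunks
-- ===== SOURCE B (Python) =====
-- from typing import Tuple, List
--
-- TOKEN_TYPE_BREAK = "<BREAK>"
--
-- def split_tokens_by_breaks(tokens: List[Tuple[str, int]]) -> List[List[Tuple[str, int]]]:
--     """Two-pointer scan: skip break runs, slice out each maximal non-break run."""
--     chunks = []
--     rest = tokens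
--     while rest:
--         # drop leading breaks
--         i = 0
--         while i < len(rest) and rest[i][0] == TOKEN_TYPE_BREAK:
--             i += 1
--         rest = rest[i:]
--         if not rest:
--             break
--         # take the maximal run of non-break tokens
--         j = 0
--         while j < len(rest) and rest[j][0] != TOKEN_TYPE_BREAK:
--             j += 1
--         chunks.append(rest[:j])
--         rest = rest[j:]
--     return chunks
-- ===== Notes on version B (the rewrite author's own statement) =====
-- stated objective: alternative
-- what changed: Replaces the element-by-element accumulator loop (chunks + current_chunk) with a two-pointer scan that skips each run of break tokens and slices out each maximal non-break run in one step.
import Mathlib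
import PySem

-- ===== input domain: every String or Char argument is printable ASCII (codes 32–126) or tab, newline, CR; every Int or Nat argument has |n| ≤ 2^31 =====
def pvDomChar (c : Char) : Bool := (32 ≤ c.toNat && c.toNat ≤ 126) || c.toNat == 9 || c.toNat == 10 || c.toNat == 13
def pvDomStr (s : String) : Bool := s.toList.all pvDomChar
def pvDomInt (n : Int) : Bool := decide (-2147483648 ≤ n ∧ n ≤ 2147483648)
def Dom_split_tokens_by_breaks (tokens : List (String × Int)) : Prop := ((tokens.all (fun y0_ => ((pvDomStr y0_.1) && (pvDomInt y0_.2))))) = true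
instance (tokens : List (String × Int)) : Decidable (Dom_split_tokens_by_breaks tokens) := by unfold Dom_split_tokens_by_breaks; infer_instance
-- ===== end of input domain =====

-- B replaces A's accumulator loop by a two-pointer scan (skip a break run, slice off a
-- maximal non-break run); equal return value proved on all inputs ("alternative", not faster).

-- ===== PORT A =====
-- A's loop: state (chunks, current_chunk); on a break flush current_chunk if non-empty,
-- otherwise append the token to current_chunk; flush the last chunk at the end.
def pvStepA (st : List (List (String × Int)) × List (String × Int)) (tok : String × Int) :
    List (List (String × Int)) × List (String × Int) :=
  if tok.1 == "<BREAK>" then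
    if st.2 ≠ [] then (st.1 ++ [st.2], []) else st
  else
    (st.1, st.2 ++ [tok])

def split_tokens_by_breaks (tokens : List (String × Int)) : List (List (String × Int)) :=
  let st := tokens.foldl pvStepA ([], [])
  if st.2 ≠ [] then st.1 ++ [st.2] else st.1

-- ===== PORT B =====
def pvIsBrk (t : String × Int) : Bool := t.1 == "<BREAK>"

-- B's outer while loop: drop the leading break run (rest = rest[i:]); if something is
-- left, emit the maximal non-break prefix (rest[:j]) and continue on rest[j:].
def split_tokens_by_breaks_alt (tokens : List (String × Int)) : List (List (String × Int)) :=
  match h : tokens.dropWhile pvIsBrk with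
  | [] => []
  | t :: ts =>
      ((t :: ts).takeWhile (fun x => !pvIsBrk x))
        :: split_tokens_by_breaks_alt ((t :: ts).dropWhile (fun x => !pvIsBrk x))
termination_by tokens.length
decreasing_by
  have h1 : (t :: ts).length ≤ tokens.length := by
    have := List.Sublist.length_le (List.dropWhile_sublist (l := tokens) (p := pvIsBrk))
    rw [h] at this; exact this
  have hhd : pvIsBrk t = false := by
    have := List.head_dropWhile_not (p := pvIsBrk) (l := tokens) (by simp [h])
    simpa [h] using this
  have h2 : ((t :: ts).dropWhile (fun x => !pvIsBrk x)).length ≤ ts.length := by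
    rw [List.dropWhile_cons]; simp only [hhd, Bool.not_false, if_pos]
    exact List.Sublist.length_le (List.dropWhile_sublist _)
  simp only [List.length_cons] at h1
  omega

-- ===== PRECONDITION & SPEC =====
def Spec_split_tokens_by_breaks (tokens : List (String × Int)) (out : List (List (String × Int))) : Prop := out = split_tokens_by_breaks_alt tokens
instance (tokens : List (String × Int)) (out : List (List (String × Int))) : Decidable (Spec_split_tokens_by_breaks tokens out) := by unfold Spec_split_tokens_by_breaks; infer_instance

-- ===== CLAIM (what is proved, stated in full; the proofs are below) =====
def Claim_equal_split_tokens_by_breaks : Prop := ∀ (tokens : List (String × Int)), Dom_split_tokens_by_breaks tokens → Spec_split_tokens_by_breaks tokens (split_tokens_by_breaks tokens)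

-- ===== LEMMAS AND PROOFS =====

-- A's loop, written as structural recursion on the remaining tokens (the foldl unrolled,
-- with the final flush applied).
def pvSplitAux (cur : List (String × Int)) : List (String × Int) → List (List (String × Int))
  | [] => if cur ≠ [] then [cur] else []
  | t :: ts =>
      if t.1 == "<BREAK>" then
        if cur ≠ [] then cur :: pvSplitAux [] ts else pvSplitAux [] ts
      else pvSplitAux (cur ++ [t]) ts

lemma pvFoldA_eq (tokens : List (String × Int)) :
    ∀ (chunks : List (List (String × Int))) (cur : List (String × Int)),
    (let st := tokens.foldl pvStepA (chunks, cur)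
     if st.2 ≠ [] then st.1 ++ [st.2] else st.1) = chunks ++ pvSplitAux cur tokens := by
  induction tokens with
  | nil => intro chunks cur; by_cases hc : cur = [] <;> simp [pvSplitAux, hc]
  | cons t ts ih =>
      intro chunks cur
      by_cases hb : t.1 == "<BREAK>"
      · by_cases hc : cur = []
        · simpa [pvStepA, hb, hc, pvSplitAux] using ih chunks []
        · have := ih (chunks ++ [cur]) []
          simp [pvStepA, hb, hc, pvSplitAux] at this ⊢
          rw [this]
      · simpa [pvStepA, hb, pvSplitAux] using ih chunks (cur ++ [t])

lemma pvAlt_cons_brk (t : String × Int) (ts : List (String × Int)) (hb : pvIsBrk t = true) :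
    split_tokens_by_breaks_alt (t :: ts) = split_tokens_by_breaks_alt ts := by
  have hd : List.dropWhile pvIsBrk (t :: ts) = List.dropWhile pvIsBrk ts := by
    simp [hb]
  rw [split_tokens_by_breaks_alt, split_tokens_by_breaks_alt, hd]

-- the key invariant: pvSplitAux cur relates to B's scan
lemma pvSplitAux_eq (tokens : List (String × Int)) :
    ∀ (cur : List (String × Int)),
    pvSplitAux cur tokens =
      if cur = [] then split_tokens_by_breaks_alt tokens
      else (cur ++ tokens.takeWhile (fun x => !pvIsBrk x))
             :: split_tokens_by_breaks_alt (tokens.dropWhile (fun x => !pvIsBrk x)) := by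
  induction tokens with
  | nil =>
      intro cur
      by_cases hc : cur = [] <;>
        simp [pvSplitAux, hc, split_tokens_by_breaks_alt]
  | cons t ts ih =>
      intro cur
      by_cases hb : pvIsBrk t
      · have hb' : t.1 == "<BREAK>" := by simpa [pvIsBrk] using hb
        by_cases hc : cur = []
        · simp [pvSplitAux, hb', hc, ih, pvAlt_cons_brk t ts hb]
        · simp [pvSplitAux, hb', hc, ih, pvAlt_cons_brk t ts hb, hb]
      · have hb' : ¬ (t.1 == "<BREAK>") = true := by simpa [pvIsBrk] using hb
        have hbf : pvIsBrk t = false := by simpa using hb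
        have halt : split_tokens_by_breaks_alt (t :: ts) =
            ((t :: ts).takeWhile (fun x => !pvIsBrk x))
              :: split_tokens_by_breaks_alt ((t :: ts).dropWhile (fun x => !pvIsBrk x)) := by
          have hdd : List.dropWhile pvIsBrk (t :: ts) = t :: ts := by
            simp [hbf]
          rw [split_tokens_by_breaks_alt, hdd]
        by_cases hc : cur = []
        · simp [pvSplitAux, hb', hc, ih, halt, hbf]
        · simp [pvSplitAux, hb', hc, ih, hbf]

-- ===== VERDICT (by name: the statement is the Claim_ definition above) =====
theorem split_tokens_by_breaks_spec : Claim_equal_split_tokens_by_breaks := by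
  intro tokens _
  unfold Spec_split_tokens_by_breaks split_tokens_by_breaks
  rw [pvFoldA_eq tokens [] [], pvSplitAux_eq tokens []]
  simp
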